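-- pv_equiv track=rewrite | github.com/elricbk/pgn2html | pgn2html.py | wrap_chess_pieces
-- ===== SOURCE A (Python) =====
-- TABLE = dict(zip(map(ord, "KQBNRP"), map(ord, "LWVMTO")))
--
-- def wrap_chess_pieces(move, color):
--     wrapped_move = ""
--     for char in move:
--         if char in "KQBNRP":
--             wrapped_move += f'<span class="chess-piece">{char}</span>'
--         else:
--             wrapped_move += char
--     return wrapped_move if color == "white" else wrapped_move.translate(TABLE)
-- ===== SOURCE B (Python) =====
-- import re
--
-- TABLE = dict(zip(map(ord, "KQBNRP"), map(ord, "LWVMTO")))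
--
-- _PIECE_RE = re.compile(r'[KQBNRP]')
--
-- def wrap_chess_pieces(move, color):
--     def repl(m):
--         c = m.group(0)
--         if color != "white":
--             c = chr(TABLE[ord(c)])
--         return f'<span class="chess-piece">{c}</span>'
--     return _PIECE_RE.sub(repl, move)
-- ===== Notes on version B (the rewrite author's own statement) =====
-- stated objective: idiomatic
-- what changed: Replaces A's explicit character loop with string concatenation plus a whole-string .translate pass by a single re.sub over [KQBNRP] with a callback that translates only the matched letter inline.
import Mathlib
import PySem

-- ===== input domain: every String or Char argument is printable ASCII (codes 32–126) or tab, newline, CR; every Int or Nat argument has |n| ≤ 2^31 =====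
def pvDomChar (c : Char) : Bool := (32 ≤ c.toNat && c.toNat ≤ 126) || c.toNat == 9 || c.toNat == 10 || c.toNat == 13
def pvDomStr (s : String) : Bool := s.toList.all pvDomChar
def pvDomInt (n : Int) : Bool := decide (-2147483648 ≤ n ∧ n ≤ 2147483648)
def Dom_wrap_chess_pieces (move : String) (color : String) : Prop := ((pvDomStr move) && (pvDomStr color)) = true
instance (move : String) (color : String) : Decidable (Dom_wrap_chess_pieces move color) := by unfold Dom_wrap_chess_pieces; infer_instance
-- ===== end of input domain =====

-- B replaces A's explicit loop (wrap, then whole-string translate) by a single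
-- regex-substitution-style pass that translates only the matched piece letter inline (idiomatic).

-- TABLE = dict(zip(map(ord, "KQBNRP"), map(ord, "LWVMTO")))  (shared module constant)
def pvTABLE : List (Int × Int) :=
  List.zip ("KQBNRP".toList.map (fun c => (c.toNat : Int)))
           ("LWVMTO".toList.map (fun c => (c.toNat : Int)))

-- str.translate(TABLE) applied to one character: look up ord(c), replace if present.
-- (In B's Python this is chr(TABLE[ord(c)]), applied only to matched piece letters, where the key
-- is always present, so the `none` fallback is never reached there.)
def pvTranslateChar (c : Char) : Char :=
  match List.lookup ((c.toNat : Int)) pvTABLE with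
  | some v => Char.ofNat v.toNat
  | none => c

-- ===== PORT A =====
def wrap_chess_pieces (move : String) (color : String) : String :=
  let wrapped := move.toList.foldl (fun acc c =>
    if c ∈ "KQBNRP".toList then
      acc ++ "<span class=\"chess-piece\">".toList ++ [c] ++ "</span>".toList
    else acc ++ [c]) ([] : List Char)
  if color == "white" then String.mk wrapped
  else String.mk (wrapped.map pvTranslateChar)

-- ===== PORT B =====
-- re.sub(r'[KQBNRP]', repl, move): each matched letter is replaced by the span (with the letter
-- translated when color != "white"); non-matching characters pass through unchanged.
def wrap_chess_pieces_alt (move : String) (color : String) : String :=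
  String.mk (move.toList.flatMap (fun c =>
    if c ∈ "KQBNRP".toList then
      "<span class=\"chess-piece\">".toList ++
        [if color == "white" then c else pvTranslateChar c] ++ "</span>".toList
    else [c]))

-- ===== PRECONDITION & SPEC =====
def Spec_wrap_chess_pieces (move : String) (color : String) (out : String) : Prop := out = wrap_chess_pieces_alt move color
instance (move : String) (color : String) (out : String) : Decidable (Spec_wrap_chess_pieces move color out) := by unfold Spec_wrap_chess_pieces; infer_instance

-- ===== CLAIM (what is proved, stated in full; the proofs are below) =====
def Claim_equal_wrap_chess_pieces : Prop := ∀ (move : String) (color : String), Dom_wrap_chess_pieces move color → Spec_wrap_chess_pieces move color (wrap_chess_pieces move color)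

-- ===== LEMMAS AND PROOFS =====

-- A's accumulating loop produces the flatMap of the per-character emission.
lemma pvFoldA (l : List Char) (acc : List Char) :
    l.foldl (fun acc c =>
      if c ∈ "KQBNRP".toList then
        acc ++ "<span class=\"chess-piece\">".toList ++ [c] ++ "</span>".toList
      else acc ++ [c]) acc
    = acc ++ l.flatMap (fun c =>
        if c ∈ "KQBNRP".toList then
          "<span class=\"chess-piece\">".toList ++ [c] ++ "</span>".toList
        else [c]) := by
  induction l generalizing acc with
  | nil => simp only [List.foldl_nil, List.flatMap_nil, List.append_nil]
  | cons c t ih =>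
    simp only [List.foldl_cons, List.flatMap_cons, ih]
    split <;> simp

lemma pvTr_nonpiece (c : Char) (h : c ∉ "KQBNRP".toList) : pvTranslateChar c = c := by
  have key : ∀ n : Nat, c.toNat = n → c = Char.ofNat n := by
    intro n hn; subst hn; exact (Char.ofNat_toNat c).symm
  have hK : (c.toNat : Int) ≠ 75 := fun hv => h (by rw [key 75 (by exact_mod_cast hv)]; decide)
  have hQ : (c.toNat : Int) ≠ 81 := fun hv => h (by rw [key 81 (by exact_mod_cast hv)]; decide)
  have hB : (c.toNat : Int) ≠ 66 := fun hv => h (by rw [key 66 (by exact_mod_cast hv)]; decide)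
  have hN : (c.toNat : Int) ≠ 78 := fun hv => h (by rw [key 78 (by exact_mod_cast hv)]; decide)
  have hR : (c.toNat : Int) ≠ 82 := fun hv => h (by rw [key 82 (by exact_mod_cast hv)]; decide)
  have hP : (c.toNat : Int) ≠ 80 := fun hv => h (by rw [key 80 (by exact_mod_cast hv)]; decide)
  have htab : pvTABLE = [((75:Int),(76:Int)), (81,87), (66,86), (78,77), (82,84), (80,79)] := by
    decide
  have eK := beq_eq_false_iff_ne.mpr hK
  have eQ := beq_eq_false_iff_ne.mpr hQ
  have eB := beq_eq_false_iff_ne.mpr hB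
  have eN := beq_eq_false_iff_ne.mpr hN
  have eR := beq_eq_false_iff_ne.mpr hR
  have eP := beq_eq_false_iff_ne.mpr hP
  unfold pvTranslateChar
  rw [htab]
  simp [List.lookup, eK, eQ, eB, eN, eR, eP]

-- Translating A's wrapped string character-wise = B's inline translation (non-white case).
lemma pvMapFlat (l : List Char) :
    (l.flatMap (fun c =>
        if c ∈ "KQBNRP".toList then
          "<span class=\"chess-piece\">".toList ++ [c] ++ "</span>".toList
        else [c])).map pvTranslateChar
    = l.flatMap (fun c =>
        if c ∈ "KQBNRP".toList then
          "<span class=\"chess-piece\">".toList ++ [pvTranslateChar c] ++ "</span>".toList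
        else [c]) := by
  induction l with
  | nil => simp
  | cons c t ih =>
    simp only [List.flatMap_cons, List.map_append, ih]
    congr 1
    split
    · simp; decide
    · rename_i h; simp [pvTr_nonpiece c h]

-- ===== VERDICT (by name: the statement is the Claim_ definition above) =====
theorem wrap_chess_pieces_spec : Claim_equal_wrap_chess_pieces := by
  intro move color _
  unfold Spec_wrap_chess_pieces wrap_chess_pieces wrap_chess_pieces_alt
  simp only [pvFoldA, List.nil_append]
  by_cases h : color = "white"
  · subst h; simp
  · have hb : (color == "white") = false := by simp [h]
    simp only [hb, Bool.false_eq_true, if_false]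
    rw [pvMapFlat]
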